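-- pv_equiv track=rewrite | github.com/yinlinchen/Intro-to-AI-Showcases | StudentCode/Sp22/Team6/fast_player.py | select_nonrandom_new_state
-- ===== SOURCE A (Python) =====
-- def select_nonrandom_new_state(board_state, successors, ts):
--     successor_ind = -1
--
--     for i in range(0, len(successors)):
--         if successor_ind == -1:
--             new_location = 0
--         else:
--             new_location = successors[successor_ind]["action"][1]
--
--         succ_new_loc = successors[i]["action"][1]
--         if (succ_new_loc > new_location):
--             successor_ind = i
--
--     if successor_ind != -1:
--         return successor_ind
--
--     return -1
-- ===== SOURCE B (Python) =====
-- def select_nonrandom_new_state(board_state, successors, ts):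
--     vals = [s["action"][1] for s in successors]
--     if not vals:
--         return -1
--     m = max(vals)
--     if m > 0:
--         return vals.index(m)
--     return -1
-- ===== Notes on version B (the rewrite author's own statement) =====
-- stated objective: simpler
-- what changed: Replaces the hand-rolled index loop with running argmax state by a build-values / max / index decomposition: materialize the action[1] values, take max, return its earliest position if positive, else -1.
import Mathlib
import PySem

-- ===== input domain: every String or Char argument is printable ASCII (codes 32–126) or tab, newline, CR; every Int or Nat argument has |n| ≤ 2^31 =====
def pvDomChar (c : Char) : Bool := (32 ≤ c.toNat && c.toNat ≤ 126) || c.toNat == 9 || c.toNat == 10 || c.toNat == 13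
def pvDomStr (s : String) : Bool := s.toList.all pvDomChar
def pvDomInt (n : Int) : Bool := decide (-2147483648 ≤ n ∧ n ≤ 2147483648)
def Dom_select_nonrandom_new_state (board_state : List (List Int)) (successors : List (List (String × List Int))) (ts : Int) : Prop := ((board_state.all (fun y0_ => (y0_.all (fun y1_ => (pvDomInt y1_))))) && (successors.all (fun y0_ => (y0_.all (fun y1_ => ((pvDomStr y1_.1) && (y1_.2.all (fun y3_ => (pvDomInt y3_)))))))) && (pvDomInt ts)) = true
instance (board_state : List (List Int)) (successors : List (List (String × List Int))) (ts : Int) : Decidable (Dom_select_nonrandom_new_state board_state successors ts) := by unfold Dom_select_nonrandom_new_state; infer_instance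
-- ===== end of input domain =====

-- B replaces A's hand-rolled index loop with running argmax state by a
-- build-values / max / earliest-index decomposition (simpler; same cost).

-- s["action"][1] — shared by both Pythons; total form, used only under Pre_
def pvActionVal (s : List (String × List Int)) : Int :=
  PySem.List.pyGetD (((PySem.Dict.mk s).get? "action").getD []) 1 0

-- ===== PORT A =====
def select_nonrandom_new_state (board_state : List (List Int)) (successors : List (List (String × List Int))) (ts : Int) : Int :=
  let successor_ind : Int :=
    (PySem.List.pyRange 0 (successors.length : Int) 1).foldl
      (fun successor_ind i =>
        let new_location : Int :=
          if successor_ind = -1 then 0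
          else pvActionVal (PySem.List.pyGetD successors successor_ind [])
        let succ_new_loc : Int := pvActionVal (PySem.List.pyGetD successors i [])
        if succ_new_loc > new_location then i else successor_ind)
      (-1)
  if successor_ind ≠ -1 then successor_ind else -1

-- ===== PORT B =====
def select_nonrandom_new_state_alt (board_state : List (List Int)) (successors : List (List (String × List Int))) (ts : Int) : Int :=
  let vals : List Int := successors.map pvActionVal
  if vals = [] then -1
  else
    match PySem.List.max? vals (fun y => y) with
    | none => -1            -- unreachable: vals ≠ []
    | some m => if m > 0 then ((PySem.List.index? vals m).getD 0 : Int) else -1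

-- ===== PRECONDITION & SPEC =====
-- Pre_: every successor dict has an "action" entry whose list has at least 2 elements;
-- elsewhere the Python A (and B) raises KeyError/IndexError at s["action"][1].
def Pre_select_nonrandom_new_state (board_state : List (List Int)) (successors : List (List (String × List Int))) (ts : Int) : Prop :=
  (successors.all (fun s =>
    match (PySem.Dict.mk s).get? "action" with
    | some l => decide (2 ≤ l.length)
    | none => false)) = true
instance (board_state : List (List Int)) (successors : List (List (String × List Int))) (ts : Int) : Decidable (Pre_select_nonrandom_new_state board_state successors ts) := by unfold Pre_select_nonrandom_new_state; infer_instance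

def pvWitness_select_nonrandom_new_state : List (List Int) × (List (List (String × List Int))) × Int :=
  ([], [[("action", [0, 5])], [("action", [1, 3])]], 0)

def Spec_select_nonrandom_new_state (board_state : List (List Int)) (successors : List (List (String × List Int))) (ts : Int) (out : Int) : Prop := out = select_nonrandom_new_state_alt board_state successors ts
instance (board_state : List (List Int)) (successors : List (List (String × List Int))) (ts : Int) (out : Int) : Decidable (Spec_select_nonrandom_new_state board_state successors ts out) := by unfold Spec_select_nonrandom_new_state; infer_instance

-- ===== CLAIM (what is proved, stated in full; the proofs are below) =====
def Claim_equal_select_nonrandom_new_state : Prop := ∀ (board_state : List (List Int)) (successors : List (List (String × List Int))) (ts : Int), Dom_select_nonrandom_new_state board_state successors ts → Pre_select_nonrandom_new_state board_state successors ts → Spec_select_nonrandom_new_state board_state successors ts (select_nonrandom_new_state board_state successors ts)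

-- ===== LEMMAS AND PROOFS =====

-- B's value as a function of the extracted values list
def pvBest (p : List Int) : Int :=
  match PySem.List.max? p (fun y => y) with
  | none => -1
  | some m => if m > 0 then ((PySem.List.index? p m).getD 0 : Int) else -1

lemma pvBest_nil : pvBest [] = -1 := rfl

lemma pvBest_of_max_pos {p : List Int} {m : Int}
    (hm : PySem.List.max? p (fun y => y) = some m) (h0 : m > 0) :
    pvBest p = ((PySem.List.index? p m).getD 0 : Int) := by
  unfold pvBest; rw [hm]; dsimp only; rw [if_pos h0]

lemma pvBest_of_max_nonpos {p : List Int} {m : Int}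
    (hm : PySem.List.max? p (fun y => y) = some m) (h0 : ¬ m > 0) :
    pvBest p = -1 := by
  unfold pvBest; rw [hm]; dsimp only; rw [if_neg h0]

lemma pvBest_pos {p : List Int} {m : Int}
    (hm : PySem.List.max? p (fun y => y) = some m) (h0 : m > 0) :
    ∃ j : Nat, pvBest p = (j : Int) ∧ ∃ hj : j < p.length, p[j] = m := by
  have hmem : m ∈ p := PySem.List.max?_mem hm
  have hsome : (PySem.List.index? p m).isSome = true :=
    (PySem.List.index?_isSome_iff p m).mpr hmem
  obtain ⟨k, hk⟩ := Option.isSome_iff_exists.mp hsome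
  obtain ⟨hlt, hget, -⟩ := PySem.List.getElem_of_index?_eq_some hk
  refine ⟨k, ?_, hlt, hget⟩
  rw [pvBest_of_max_pos hm h0, hk]; rfl

lemma pvBest_cases (p : List Int) :
    pvBest p = -1 ∨ ∃ j : Nat, pvBest p = (j : Int) ∧ j < p.length := by
  cases hm : PySem.List.max? p (fun y => y) with
  | none => left; unfold pvBest; rw [hm]
  | some m =>
    by_cases h0 : m > 0
    · obtain ⟨j, hj, hlt, -⟩ := pvBest_pos hm h0
      exact Or.inr ⟨j, hj, hlt⟩
    · exact Or.inl (pvBest_of_max_nonpos hm h0)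

lemma pvBest_append (p : List Int) (x : Int) :
    pvBest (p ++ [x]) =
      if x > (if pvBest p = -1 then 0 else PySem.List.pyGetD p (pvBest p) 0)
      then (p.length : Int) else pvBest p := by
  cases p with
  | nil =>
    rw [pvBest_nil, if_pos rfl, List.nil_append]
    have hx1 : PySem.List.max? [x] (fun y => y) = some x := by
      simpa using PySem.List.max?_id_cons x []
    by_cases hx : x > 0
    · rw [pvBest_of_max_pos hx1 hx, PySem.List.index?_cons_self, if_pos hx]; rfl
    · rw [pvBest_of_max_nonpos hx1 hx, if_neg hx]
  | cons h t =>
    set m : Int := List.foldl max h t with hmdef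
    have hm : PySem.List.max? (h :: t) (fun y => y) = some m :=
      PySem.List.max?_id_cons h t
    have happ : PySem.List.max? ((h :: t) ++ [x]) (fun y => y) = some (max m x) := by
      have := PySem.List.max?_id_cons h (t ++ [x])
      simpa [List.foldl_append, hmdef] using this
    have hmax : ∀ y ∈ (h :: t), y ≤ m := by
      intro y hy; exact PySem.List.max?_isMax hm y hy
    by_cases h0 : m > 0
    · obtain ⟨j, hj, hlt, hget⟩ := pvBest_pos hm h0
      have hjne : pvBest (h :: t) ≠ -1 := by rw [hj]; omega
      have hgetD : PySem.List.pyGetD (h :: t) (pvBest (h :: t)) 0 = m := by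
        rw [hj, PySem.List.pyGetD_eq_getElem _ _ (by omega) (by exact_mod_cast hlt)]
        simpa using hget
      rw [if_neg hjne, hgetD]
      by_cases hx : x > m
      · have hxpos : x > 0 := lt_trans h0 hx
        have happx : PySem.List.max? ((h :: t) ++ [x]) (fun y => y) = some x := by
          rw [happ, max_eq_right (le_of_lt hx)]
        have hnotmem : x ∉ (h :: t) := fun hin => absurd (hmax x hin) (by omega)
        rw [pvBest_of_max_pos happx hxpos,
          PySem.List.index?_append_singleton_self _ x hnotmem, if_pos hx]
        rfl
      · have happm : PySem.List.max? ((h :: t) ++ [x]) (fun y => y) = some m := by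
          rw [happ, max_eq_left (by omega)]
        have hmem : m ∈ (h :: t) := PySem.List.max?_mem hm
        rw [pvBest_of_max_pos happm h0,
          PySem.List.index?_append_of_mem _ hmem, if_neg hx,
          ← pvBest_of_max_pos hm h0]
    · have hb : pvBest (h :: t) = -1 := pvBest_of_max_nonpos hm h0
      rw [hb, if_pos rfl]
      by_cases hx : x > 0
      · have happx : PySem.List.max? ((h :: t) ++ [x]) (fun y => y) = some x := by
          rw [happ, max_eq_right (by omega)]
        have hnotmem : x ∉ (h :: t) := fun hin => absurd (hmax x hin) (by omega)
        rw [pvBest_of_max_pos happx hx,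
          PySem.List.index?_append_singleton_self _ x hnotmem, if_pos hx]
        rfl
      · have hmx : ¬ max m x > 0 := by
          rcases max_choice m x with hc | hc <;> rw [hc] <;> omega
        rw [pvBest_of_max_nonpos happ hmx, if_neg hx]

-- A's loop over indices 0..k computes pvBest of the first k values
lemma pvLoop_eq (vals : List Int) (k : Nat) (hk : k ≤ vals.length) :
    (PySem.List.pyRange 0 (k : Int) 1).foldl
      (fun ind i =>
        if PySem.List.pyGetD vals i 0 >
            (if ind = -1 then 0 else PySem.List.pyGetD vals ind 0)
        then i else ind)
      (-1)
    = pvBest (vals.take k) := by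
  induction k with
  | zero => simp [PySem.List.pyRange_one_eq_nil, pvBest_nil]
  | succ k ih =>
    have hk' : k < vals.length := hk
    have hcast : ((k + 1 : Nat) : Int) = (k : Int) + 1 := by push_cast; ring
    rw [hcast, PySem.List.pyRange_one_succ_right (by positivity), List.foldl_append,
      ih (le_of_lt hk')]
    have hp : vals.take (k + 1) = vals.take k ++ [vals[k]] := by
      rw [List.take_add_one, List.getElem?_eq_getElem hk']; rfl
    have hlen : (vals.take k).length = k := by
      simp [List.length_take, Nat.min_eq_left (le_of_lt hk')]
    rw [hp, pvBest_append]
    have hvk : PySem.List.pyGetD vals (k : Int) 0 = vals[k] := by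
      rw [PySem.List.pyGetD_eq_getElem _ _ (by positivity) (by exact_mod_cast hk')]
      simp
    rcases pvBest_cases (vals.take k) with hb | ⟨j, hj, hjlt⟩
    · simp [hb, hvk, hlen]
    · have hjk : j < k := by omega
      have hbne : pvBest (vals.take k) ≠ -1 := by rw [hj]; omega
      have hgp : PySem.List.pyGetD (vals.take k) (pvBest (vals.take k)) 0
          = PySem.List.pyGetD vals (pvBest (vals.take k)) 0 := by
        rw [hj,
          PySem.List.pyGetD_eq_getElem _ _ (by omega) (by exact_mod_cast hjlt),
          PySem.List.pyGetD_eq_getElem _ _ (by omega)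
            (by exact_mod_cast lt_of_lt_of_le hjk (le_of_lt hk'))]
        simp [List.getElem_take]
      simp [hbne, hvk, hlen, hgp]

lemma pvAlt_eq_pvBest (board_state : List (List Int)) (successors : List (List (String × List Int))) (ts : Int) :
    select_nonrandom_new_state_alt board_state successors ts
      = pvBest (successors.map pvActionVal) := by
  unfold select_nonrandom_new_state_alt
  by_cases hv : successors.map pvActionVal = []
  · rw [if_pos hv, hv, pvBest_nil]
  · rw [if_neg hv]; rfl

-- ===== VERDICT (by name: the statement is the Claim_ definition above) =====
theorem select_nonrandom_new_state_spec : Claim_equal_select_nonrandom_new_state := by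
  intro board_state successors ts _ _
  unfold Spec_select_nonrandom_new_state
  rw [pvAlt_eq_pvBest]
  unfold select_nonrandom_new_state
  have hbody :
      (fun (successor_ind i : Int) =>
        if pvActionVal (PySem.List.pyGetD successors i []) >
            (if successor_ind = -1 then 0
             else pvActionVal (PySem.List.pyGetD successors successor_ind []))
        then i else successor_ind)
      = (fun (ind i : Int) =>
        if PySem.List.pyGetD (successors.map pvActionVal) i 0 >
            (if ind = -1 then 0
             else PySem.List.pyGetD (successors.map pvActionVal) ind 0)
        then i else ind) := by
    funext ind i
    rw [show (0 : Int) = pvActionVal [] from rfl,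
      PySem.List.pyGetD_map, PySem.List.pyGetD_map]
  simp only [hbody]
  have hlen : successors.length = (successors.map pvActionVal).length := by simp
  rw [hlen, pvLoop_eq (successors.map pvActionVal) _ le_rfl, List.take_length]
  rcases pvBest_cases (successors.map pvActionVal) with hb | ⟨j, hj, -⟩
  · simp [hb]
  · rw [hj]; simp
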